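-- pv_equiv track=rewrite | github.com/Time0o/leetcode | 1550-three-consecutive-odds.py | solution
-- ===== SOURCE A (Python) =====
-- def solution(arr: list[int]) -> bool:
--     odd_count = 0
--     for n in arr:
--         if n % 2 == 1:
--             odd_count += 1
--             if odd_count == 3:
--                 return True
--         else:
--             odd_count = 0
--
--     return False
-- ===== SOURCE B (Python) =====
-- def solution(arr: list[int]) -> bool:
--     t = arr
--     while len(t) >= 3:
--         if t[0] % 2 == 1 and t[1] % 2 == 1 and t[2] % 2 == 1:
--             return True
--         t = t[1:]
--     return False
-- ===== Notes on version B (the rewrite author's own statement) =====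
-- stated objective: alternative
-- what changed: Replaced A's stateful running-odd-counter scan with a sliding-window check that tests the first three elements of each suffix directly, keeping no accumulator.
import Mathlib
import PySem

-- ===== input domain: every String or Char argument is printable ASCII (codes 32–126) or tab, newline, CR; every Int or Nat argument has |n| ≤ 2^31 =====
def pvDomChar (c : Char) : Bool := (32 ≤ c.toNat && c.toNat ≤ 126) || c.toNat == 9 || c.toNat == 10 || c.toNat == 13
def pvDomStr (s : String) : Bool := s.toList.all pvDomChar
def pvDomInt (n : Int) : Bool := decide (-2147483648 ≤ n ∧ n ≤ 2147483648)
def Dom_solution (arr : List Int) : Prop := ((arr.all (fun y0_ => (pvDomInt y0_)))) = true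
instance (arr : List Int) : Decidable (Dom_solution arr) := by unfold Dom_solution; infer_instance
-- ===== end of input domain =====

-- B replaces A's stateful running-odd-counter scan with a sliding-window check over suffixes; alternative decomposition, same cost.

-- ===== PORT A =====
-- counter loop with early return: odd_count accumulator, reset on even
def solLoop : List Int → Int → Bool
  | [], _ => false
  | n :: rest, c =>
    if PySem.Int.mod n 2 == 1 then
      if c + 1 == 3 then true else solLoop rest (c + 1)
    else solLoop rest 0

def solution (arr : List Int) : Bool := solLoop arr 0

-- ===== PORT B =====
-- while len(t) >= 3: test window t[0],t[1],t[2], else drop the head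
def solution_alt : List Int → Bool
  | a :: b :: c :: rest =>
    if PySem.Int.mod a 2 == 1 && PySem.Int.mod b 2 == 1 && PySem.Int.mod c 2 == 1 then
      true
    else solution_alt (b :: c :: rest)
  | _ => false

-- ===== PRECONDITION & SPEC =====
def Spec_solution (arr : List Int) (out : Bool) : Prop := out = solution_alt arr
instance (arr : List Int) (out : Bool) : Decidable (Spec_solution arr out) := by unfold Spec_solution; infer_instance

-- ===== CLAIM (what is proved, stated in full; the proofs are below) =====
def Claim_equal_solution : Prop := ∀ (arr : List Int), Dom_solution arr → Spec_solution arr (solution arr)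

-- ===== LEMMAS AND PROOFS =====

-- "arr starts with k odd numbers"
def startsOdd : List Int → Nat → Bool
  | _, 0 => true
  | [], _ + 1 => false
  | n :: r, k + 1 => (PySem.Int.mod n 2 == 1) && startsOdd r k

theorem alt_cons (n : Int) (rest : List Int) :
    solution_alt (n :: rest) = (startsOdd (n :: rest) 3 || solution_alt rest) := by
  match rest with
  | [] => simp [solution_alt, startsOdd]
  | [b] => simp [solution_alt, startsOdd]
  | b :: c :: r =>
    simp only [solution_alt, startsOdd]
    cases PySem.Int.mod n 2 == 1 <;> cases PySem.Int.mod b 2 == 1 <;>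
      cases PySem.Int.mod c 2 == 1 <;> simp

theorem starts3_alt (xs : List Int) (h : startsOdd xs 3 = true) : solution_alt xs = true := by
  match xs with
  | [] => simp [startsOdd] at h
  | [a] => simp [startsOdd] at h
  | [a, b] => simp [startsOdd] at h
  | a :: b :: c :: r =>
    simp [startsOdd] at h
    simp [solution_alt, h.1, h.2.1, h.2.2]

theorem startsOdd_mono (xs : List Int) (k : Nat) (h : startsOdd xs (k + 1) = true) :
    startsOdd xs k = true := by
  induction xs generalizing k with
  | nil => simp [startsOdd] at h
  | cons n r ih =>
    cases k with
    | zero => rfl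
    | succ k =>
      simp [startsOdd] at h ⊢
      exact ⟨h.1, ih k h.2⟩

theorem key (xs : List Int) (k : Nat) (hk : k ≤ 2) :
    solLoop xs (k : Int) = (solution_alt xs || startsOdd xs (3 - k)) := by
  induction xs generalizing k with
  | nil =>
    obtain ⟨m, hm⟩ : ∃ m, 3 - k = m + 1 := ⟨2 - k, by omega⟩
    simp [solLoop, solution_alt, hm, startsOdd]
  | cons n rest ih =>
    have hcase : k = 0 ∨ k = 1 ∨ k = 2 := by omega
    by_cases hodd : (PySem.Int.mod n 2 == 1) = true
    · rcases hcase with rfl | rfl | rfl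
      · have hc : (((0 : Nat) : Int) + 1 == 3) = false := by decide
        have e : ((0 : Nat) : Int) + 1 = ((1 : Nat) : Int) := by norm_num
        simp only [solLoop, hodd, if_true, hc, Bool.false_eq_true, if_false]
        rw [e, ih 1 (by omega), alt_cons]
        have h30 : (3 : Nat) - 0 = 3 := rfl
        have h3 : startsOdd (n :: rest) 3 = (PySem.Int.mod n 2 == 1 && startsOdd rest 2) := rfl
        rw [h30, h3, hodd]
        cases startsOdd rest 2 <;> simp
      · have hc : (((1 : Nat) : Int) + 1 == 3) = false := by decide
        have e : ((1 : Nat) : Int) + 1 = ((2 : Nat) : Int) := by norm_num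
        simp only [solLoop, hodd, if_true, hc, Bool.false_eq_true, if_false]
        rw [e, ih 2 (by omega), alt_cons]
        have h31 : (3 : Nat) - 1 = 2 := rfl
        have h3 : startsOdd (n :: rest) 3 = (PySem.Int.mod n 2 == 1 && startsOdd rest 2) := rfl
        have h2' : startsOdd (n :: rest) 2 = (PySem.Int.mod n 2 == 1 && startsOdd rest 1) := rfl
        rw [h31, h3, h2', hodd]
        cases h2 : startsOdd rest 2 with
        | true => simp [startsOdd_mono rest 1 h2]
        | false => simp
      · have hc : (((2 : Nat) : Int) + 1 == 3) = true := by decide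
        simp only [solLoop, hodd, if_true, hc]
        have h32 : (3 : Nat) - 2 = 1 := rfl
        have h1' : startsOdd (n :: rest) 1 = (PySem.Int.mod n 2 == 1 && startsOdd rest 0) := rfl
        rw [h32, h1', hodd]
        simp [startsOdd]
    · have hodd' : (PySem.Int.mod n 2 == 1) = false := by
        cases h : PySem.Int.mod n 2 == 1
        · rfl
        · exact absurd h hodd
      simp only [solLoop, hodd', Bool.false_eq_true, if_false]
      have h0 : (0 : Int) = ((0 : Nat) : Int) := rfl
      rw [h0, ih 0 (by omega), alt_cons]
      obtain ⟨m, hm⟩ : ∃ m, 3 - k = m + 1 := ⟨2 - k, by omega⟩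
      rw [hm]
      have h5 : startsOdd (n :: rest) (m + 1) = (PySem.Int.mod n 2 == 1 && startsOdd rest m) := rfl
      have h4 : startsOdd (n :: rest) 3 = (PySem.Int.mod n 2 == 1 && startsOdd rest 2) := rfl
      rw [h5, h4, hodd']
      cases h2 : startsOdd rest 3 with
      | true => simp [starts3_alt rest h2]
      | false => simp

-- ===== VERDICT (by name: the statement is the Claim_ definition above) =====
theorem solution_spec : Claim_equal_solution := by
  intro arr _
  unfold Spec_solution solution
  have h0 : (0 : Int) = ((0 : Nat) : Int) := rfl
  rw [h0, key arr 0 (by omega)]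
  cases h : startsOdd arr 3 with
  | true => simp [starts3_alt arr h]
  | false => simp
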